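-- pv_equiv track=rewrite | github.com/I-ml-I/modbus_tcp | app/utils/relay_state.py | relay_states_registar_value
-- ===== SOURCE A (Python) =====
-- def relay_states_registar_value(relay_states):
--     num = 0
--     n = 8
--     for relay_state in relay_states:
--         if relay_state:
--             num += 2**n
--
--         n += 1
--
--     return num
-- ===== SOURCE B (Python) =====
-- def relay_states_registar_value(relay_states):
--     bits = ''.join('1' if s else '0' for s in relay_states)
--     return int(bits[::-1] or '0', 2) << 8
-- ===== Notes on version B (the rewrite author's own statement) =====
-- stated objective: idiomatic
-- what changed: Replaces A's running 2**n big-int accumulator loop with building a binary string of the bits, reversing it so the first relay is the lowest bit, parsing it once with int(.,2) and shifting by 8.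
import Mathlib
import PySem

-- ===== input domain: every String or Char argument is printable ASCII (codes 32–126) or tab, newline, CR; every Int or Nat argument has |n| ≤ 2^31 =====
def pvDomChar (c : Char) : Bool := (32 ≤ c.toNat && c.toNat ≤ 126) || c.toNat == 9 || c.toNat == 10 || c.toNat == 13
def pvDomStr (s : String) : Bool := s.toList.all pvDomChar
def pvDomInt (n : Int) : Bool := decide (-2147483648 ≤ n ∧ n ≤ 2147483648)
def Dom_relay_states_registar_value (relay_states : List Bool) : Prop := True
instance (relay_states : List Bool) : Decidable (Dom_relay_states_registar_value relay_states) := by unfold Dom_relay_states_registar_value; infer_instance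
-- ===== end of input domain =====

-- B builds a binary string of the bits, reverses it and parses it once, instead of A's running 2**n accumulation; same cost, more idiomatic.

-- ===== PORT A =====
-- A's loop: num starts 0, n starts 8; each true bit adds 2**n, n increments.
def pvLoopA : List Bool → Int → Nat → Int
  | [], num, _ => num
  | s :: rest, num, n => pvLoopA rest (num + if s then 2 ^ n else 0) (n + 1)

def relay_states_registar_value (relay_states : List Bool) : Int :=
  pvLoopA relay_states 0 8

-- ===== PORT B =====
-- int(s, 2) for a string of '0'/'1' chars, ported by hand (exact on such strings).
def pvParseBin (cs : List Char) : Int :=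
  cs.foldl (fun acc c => 2 * acc + (if c = '1' then 1 else 0)) 0

def relay_states_registar_value_alt (relay_states : List Bool) : Int :=
  let bits := relay_states.map (fun s => if s then '1' else '0')
  let rev := bits.reverse
  let rev := if rev.isEmpty then ['0'] else rev   -- the `or '0'` guard
  pvParseBin rev * 256                            -- << 8

-- ===== PRECONDITION & SPEC =====
def Spec_relay_states_registar_value (relay_states : List Bool) (out : Int) : Prop := out = relay_states_registar_value_alt relay_states
instance (relay_states : List Bool) (out : Int) : Decidable (Spec_relay_states_registar_value relay_states out) := by unfold Spec_relay_states_registar_value; infer_instance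

-- ===== CLAIM (what is proved, stated in full; the proofs are below) =====
def Claim_equal_relay_states_registar_value : Prop := ∀ (relay_states : List Bool), Dom_relay_states_registar_value relay_states → Spec_relay_states_registar_value relay_states (relay_states_registar_value relay_states)

-- ===== LEMMAS AND PROOFS =====
theorem pvParseBin_append_single (l : List Char) (c : Char) :
    pvParseBin (l ++ [c]) = 2 * pvParseBin l + (if c = '1' then 1 else 0) := by
  simp [pvParseBin, List.foldl_append]

theorem pvLoopA_eq (rs : List Bool) : ∀ (num : Int) (n : Nat),
    pvLoopA rs num n = num + 2 ^ n * pvParseBin ((rs.map (fun s => if s then '1' else '0')).reverse) := by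
  induction rs with
  | nil => intro num n; simp [pvLoopA, pvParseBin]
  | cons s rest ih =>
    intro num n
    simp only [pvLoopA, List.map_cons, List.reverse_cons, pvParseBin_append_single, ih]
    cases s <;> simp <;> ring

theorem pvIf_append_single (l : List Char) (c : Char) :
    (if (l ++ [c]).isEmpty then ['0'] else l ++ [c]) = l ++ [c] := by
  rw [if_neg]; simp

-- ===== VERDICT (by name: the statement is the Claim_ definition above) =====
theorem relay_states_registar_value_spec : Claim_equal_relay_states_registar_value := by
  intro rs _
  unfold Spec_relay_states_registar_value relay_states_registar_value relay_states_registar_value_alt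
  rw [pvLoopA_eq]
  cases rs with
  | nil => simp [pvParseBin]
  | cons s rest =>
    simp only [List.map_cons, List.reverse_cons, pvIf_append_single]
    ring
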